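-- pv_equiv track=rewrite | github.com/siran/writing | .scripts/publish/doc_utils.py | normalize_markdown_prose
-- ===== SOURCE A (Python) =====
-- from typing import List, Dict, Tuple, Optional
--
-- def normalize_markdown_prose(md: str) -> str:
--     if not md:
--         return ""
--     lines = md.replace("\r\n", "\n").split("\n")
--     out: List[str] = []
--     buf: List[str] = []
--
--     def flush_buf():
--         if buf:
--             out.append(" ".join(x.strip() for x in buf if x.strip()))
--             buf.clear()
--
--     for line in lines:
--         if not line.strip():
--             flush_buf()
--             out.append("")
--         else:
--             buf.append(line)
--     flush_buf()
--     return "\n".join(out).strip()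
-- ===== SOURCE B (Python) =====
-- def normalize_markdown_prose(md: str) -> str:
--     if not md:
--         return ""
--     stripped = [l.strip() for l in md.replace("\r\n", "\n").split("\n")]
--     out = []
--     i, n = 0, len(stripped)
--     while i < n:
--         if stripped[i] == "":
--             out.append("")
--             i += 1
--         else:
--             j = i
--             while j < n and stripped[j] != "":
--                 j += 1
--             out.append(" ".join(stripped[i:j]))
--             i = j
--     return "\n".join(out).strip()
-- ===== Notes on version B (the rewrite author's own statement) =====
-- stated objective: alternative
-- what changed: Replaces A's accumulate-and-flush line buffer with a single pre-strip of all lines followed by run-grabbing: maximal runs of non-blank stripped lines are taken as whole slices (takeWhile/dropWhile-style index scan) and joined directly.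
import Mathlib
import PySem

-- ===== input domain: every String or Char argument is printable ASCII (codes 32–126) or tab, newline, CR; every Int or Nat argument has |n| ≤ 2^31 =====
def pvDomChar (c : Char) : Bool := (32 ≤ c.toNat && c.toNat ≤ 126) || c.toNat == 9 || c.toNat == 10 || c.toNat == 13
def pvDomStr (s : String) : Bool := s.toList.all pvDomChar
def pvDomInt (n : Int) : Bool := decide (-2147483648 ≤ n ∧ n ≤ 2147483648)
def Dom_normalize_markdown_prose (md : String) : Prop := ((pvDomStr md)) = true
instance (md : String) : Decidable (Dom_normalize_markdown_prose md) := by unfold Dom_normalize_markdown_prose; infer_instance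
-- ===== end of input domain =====

-- B replaces A's accumulate-and-flush line buffer with a single pre-strip of all
-- lines followed by grabbing maximal non-blank runs (takeWhile/dropWhile scan).


-- ===== PORT A =====
-- flush_buf: if buf: out.append(" ".join(x.strip() for x in buf if x.strip()))
def pvFlushA (out buf : List String) : List String :=
  if buf = [] then out
  else out ++ [PySem.Str.join " " ((buf.map PySem.Str.strip).filter (· ≠ ""))]

-- one iteration of A's for-loop over (out, buf)
def pvStepA (s : List String × List String) (line : String) : List String × List String :=
  if PySem.Str.strip line = "" then (pvFlushA s.1 s.2 ++ [""], [])
  else (s.1, s.2 ++ [line])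

def normalize_markdown_prose (md : String) : String :=
  if md = "" then ""
  else
    let lines := ((PySem.Str.split? (PySem.Str.replace md "\r\n" "\n") "\n").getD [])
    let s := lines.foldl pvStepA ([], [])
    PySem.Str.strip (PySem.Str.join "\n" (pvFlushA s.1 s.2))

-- ===== PORT B =====
-- Source B's while loop: a blank stripped line emits ""; a non-blank one starts a
-- maximal non-blank run (inner while j), emitted as one joined slice.
def pvRunsB : List String → List String
  | [] => []
  | l :: rest =>
    if l = "" then "" :: pvRunsB rest
    else PySem.Str.join " " (l :: rest.takeWhile (· ≠ "")) :: pvRunsB (rest.dropWhile (· ≠ ""))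
termination_by ls => ls.length
decreasing_by
  · simp
  · exact Nat.lt_succ_of_le (List.length_dropWhile_le _ _)

def normalize_markdown_prose_alt (md : String) : String :=
  if md = "" then ""
  else
    let stripped := (((PySem.Str.split? (PySem.Str.replace md "\r\n" "\n") "\n").getD [])).map PySem.Str.strip
    PySem.Str.strip (PySem.Str.join "\n" (pvRunsB stripped))

-- ===== PRECONDITION & SPEC =====
def Spec_normalize_markdown_prose (md : String) (out : String) : Prop := out = normalize_markdown_prose_alt md
instance (md : String) (out : String) : Decidable (Spec_normalize_markdown_prose md out) := by unfold Spec_normalize_markdown_prose; infer_instance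

-- ===== CLAIM (what is proved, stated in full; the proofs are below) =====
def Claim_equal_normalize_markdown_prose : Prop := ∀ (md : String), Dom_normalize_markdown_prose md → Spec_normalize_markdown_prose md (normalize_markdown_prose md)

-- ===== LEMMAS AND PROOFS =====

lemma pvTakeWhile_append_blank {p : String → Bool} {t rest : List String}
    (h : ∀ x ∈ t, p x = true) (hb : p "" = false) :
    (t ++ "" :: rest).takeWhile p = t := by
  rw [List.takeWhile_append, List.takeWhile_eq_self_iff.mpr h]
  simp [List.takeWhile, hb]

lemma pvDropWhile_append_blank {p : String → Bool} {t rest : List String}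
    (h : ∀ x ∈ t, p x = true) (hb : p "" = false) :
    (t ++ "" :: rest).dropWhile p = "" :: rest := by
  rw [List.dropWhile_append]
  cases t with
  | nil => simp [List.dropWhile, hb]
  | cons a u =>
    have : (a :: u).dropWhile p = [] := List.dropWhile_eq_nil_iff.mpr h
    rw [this]
    simp [List.dropWhile, hb]

-- pvRunsB on an all-non-blank list: one single paragraph
lemma pvRunsB_all_nonblank {l : List String} (h : ∀ x ∈ l, x ≠ "") :
    pvRunsB l = if l = [] then [] else [PySem.Str.join " " l] := by
  cases l with
  | nil => rw [pvRunsB]; rfl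
  | cons a t =>
    have ha : a ≠ "" := h a (by simp)
    have ht : ∀ x ∈ t, (fun x => decide (x ≠ "")) x = true := by
      intro x hx; simpa using h x (by simp [hx])
    rw [pvRunsB, if_neg ha, List.takeWhile_eq_self_iff.mpr ht,
      List.dropWhile_eq_nil_iff.mpr ht]
    rw [pvRunsB]
    simp [List.cons_ne_nil]

-- pvRunsB on (non-blank run ++ "" :: rest)
lemma pvRunsB_append_blank {t rest : List String} (h : ∀ x ∈ t, x ≠ "") :
    pvRunsB (t ++ "" :: rest) =
      (if t = [] then [] else [PySem.Str.join " " t]) ++ "" :: pvRunsB rest := by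
  cases t with
  | nil =>
    rw [List.nil_append, pvRunsB]
    simp
  | cons a s =>
    have ha : a ≠ "" := h a (by simp)
    have hs : ∀ x ∈ s, (fun x => decide (x ≠ "")) x = true := by
      intro x hx; simpa using h x (by simp [hx])
    rw [List.cons_append, pvRunsB, if_neg ha,
      pvTakeWhile_append_blank hs (by simp), pvDropWhile_append_blank hs (by simp)]
    rw [pvRunsB]
    simp [List.cons_ne_nil]

-- flushA under the invariant = one paragraph entry
lemma pvFlushA_eq {out buf : List String} (h : ∀ x ∈ buf, PySem.Str.strip x ≠ "") :
    pvFlushA out buf =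
      out ++ (if buf = [] then [] else [PySem.Str.join " " (buf.map PySem.Str.strip)]) := by
  unfold pvFlushA
  split_ifs with hb
  · simp
  · have : (buf.map PySem.Str.strip).filter (· ≠ "") = buf.map PySem.Str.strip := by
      rw [List.filter_eq_self]
      intro a hma
      obtain ⟨x, hx, rfl⟩ := List.mem_map.mp hma
      simpa using h x hx
    rw [this]

-- the main invariant: A's fold from (out, buf) followed by a final flush
-- produces out ++ B's runs of (strips of buf ++ strips of remaining lines)
lemma pvFold_spec (ls : List String) : ∀ (out buf : List String),
    (∀ x ∈ buf, PySem.Str.strip x ≠ "") →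
    pvFlushA (ls.foldl pvStepA (out, buf)).1 (ls.foldl pvStepA (out, buf)).2 =
      out ++ pvRunsB (buf.map PySem.Str.strip ++ ls.map PySem.Str.strip) := by
  induction ls with
  | nil =>
    intro out buf h
    simp only [List.foldl_nil, List.map_nil, List.append_nil]
    rw [pvFlushA_eq h, pvRunsB_all_nonblank (l := buf.map PySem.Str.strip)
      (fun a hma => by obtain ⟨x, hx, rfl⟩ := List.mem_map.mp hma; exact h x hx)]
    cases buf <;> simp
  | cons l ls ih =>
    intro out buf h
    rw [List.foldl_cons]
    by_cases hl : PySem.Str.strip l = ""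
    · have hstep : pvStepA (out, buf) l = (pvFlushA out buf ++ [""], []) := by
        simp [pvStepA, hl]
      rw [hstep, ih _ [] (by simp)]
      rw [List.map_cons, hl, pvRunsB_append_blank
        (fun a hma => by obtain ⟨x, hx, rfl⟩ := List.mem_map.mp hma; exact h x hx)]
      rw [pvFlushA_eq h]
      cases buf <;> simp
    · have hstep : pvStepA (out, buf) l = (out, buf ++ [l]) := by
        simp [pvStepA, hl]
      rw [hstep, ih out (buf ++ [l]) (by
        intro x hx
        rcases List.mem_append.mp hx with h1 | h2
        · exact h x h1
        · simp at h2; subst h2; exact hl)]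
      simp

-- ===== VERDICT (by name: the statement is the Claim_ definition above) =====
theorem normalize_markdown_prose_spec : Claim_equal_normalize_markdown_prose := by
  intro md _
  unfold Spec_normalize_markdown_prose normalize_markdown_prose normalize_markdown_prose_alt
  by_cases hmd : md = ""
  · simp [hmd]
  · simp only [if_neg hmd]
    have := pvFold_spec (((PySem.Str.split? (PySem.Str.replace md "\r\n" "\n") "\n").getD [])) [] [] (by simp)
    simp only [List.map_nil, List.nil_append] at this
    rw [this]
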